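-- pv_equiv track=rewrite | github.com/ashvinbashyam3/video-slide-transcript-extractor | main.py | consolidate_speaker_entries
-- ===== SOURCE A (Python) =====
-- from typing import Optional, List, Dict, Tuple
--
-- def consolidate_speaker_entries(entries: List[Dict]) -> List[Dict]:
--     """
--     Consolidate consecutive entries from the same speaker into single entries.
--
--     Before: [{speaker: "John", text: "Hello"}, {speaker: "John", text: "How are you?"}]
--     After:  [{speaker: "John", text: "Hello How are you?"}]
--     """
--     if not entries:
--         return entries
--
--     consolidated = []
--     current = entries[0].copy()
--
--     for entry in entries[1:]:
--         if entry.get('speaker', '').upper() == current.get('speaker', '').upper():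
--             # Same speaker - merge text
--             current['text'] = current.get('text', '') + ' ' + entry.get('text', '')
--         else:
--             # Different speaker - save current and start new
--             consolidated.append(current)
--             current = entry.copy()
--
--     # Don't forget the last entry
--     consolidated.append(current)
--
--     return consolidated
-- ===== SOURCE B (Python) =====
-- def consolidate_speaker_entries(entries):
--     """
--     Consolidate consecutive entries from the same speaker into single entries.
--
--     Run-detection rewrite: find each maximal run of consecutive entries with the
--     same (case-insensitive) speaker, copy the run's first entry, and for runs of
--     more than one entry set its 'text' to the ' '-join of the run's texts.
--     """
--     if not entries:
--         return entries
--
--     result = []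
--     n = len(entries)
--     i = 0
--     while i < n:
--         key = entries[i].get('speaker', '').upper()
--         j = i + 1
--         while j < n and entries[j].get('speaker', '').upper() == key:
--             j += 1
--         head = entries[i].copy()
--         if j - i > 1:
--             head['text'] = ' '.join(e.get('text', '') for e in entries[i:j])
--         result.append(head)
--         i = j
--     return result
-- ===== Notes on version B (the rewrite author's own statement) =====
-- stated objective: alternative
-- what changed: Replaced A's running-accumulator loop (which merges texts pairwise into a mutable 'current' dict by repeated concatenation) with a run-detection scan: an index loop finds each maximal run of consecutive same-speaker entries and builds that run's output once, with a single ' '.join of the run's texts, leaving singleton runs' entries untouched.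
import Mathlib
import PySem

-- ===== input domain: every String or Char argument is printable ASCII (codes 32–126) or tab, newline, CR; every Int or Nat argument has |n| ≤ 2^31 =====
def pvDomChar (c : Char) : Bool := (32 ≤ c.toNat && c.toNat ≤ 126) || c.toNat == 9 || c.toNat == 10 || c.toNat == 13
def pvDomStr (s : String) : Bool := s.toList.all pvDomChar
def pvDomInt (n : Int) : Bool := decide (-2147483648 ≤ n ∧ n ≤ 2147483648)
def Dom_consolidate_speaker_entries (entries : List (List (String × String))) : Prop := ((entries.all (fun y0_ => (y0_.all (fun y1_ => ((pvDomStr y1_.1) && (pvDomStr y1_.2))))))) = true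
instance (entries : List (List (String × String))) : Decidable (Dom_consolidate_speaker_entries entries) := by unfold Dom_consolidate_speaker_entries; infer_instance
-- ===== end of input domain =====

-- B replaces A's running-accumulator merge loop by a run-detection scan (one ' '.join per
-- maximal same-speaker run); the two return the same value on every input (alternative, not faster).


-- shared dict helpers (a Python dict entry is its association list; lookup/insert via PySem.Dict)
def pvGetD (e : List (String × String)) (k d : String) : String := (PySem.Dict.mk e).getD k d

def pvKey (e : List (String × String)) : String := PySem.Str.upper (pvGetD e "speaker" "")

def pvText (e : List (String × String)) : String := pvGetD e "text" ""

def pvSetText (e : List (String × String)) (t : String) : List (String × String) :=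
  ((PySem.Dict.mk e).insert "text" t).items

-- ===== PORT A =====
-- the loop body of A's for-loop: state = (consolidated, current)
def pvAStep (st : List (List (String × String)) × List (String × String))
    (entry : List (String × String)) : List (List (String × String)) × List (String × String) :=
  if pvKey entry = pvKey st.2 then
    (st.1, pvSetText st.2 (pvText st.2 ++ " " ++ pvText entry))
  else
    (st.1 ++ [st.2], entry)

def consolidate_speaker_entries (entries : List (List (String × String))) : List (List (String × String)) :=
  match entries with
  | [] => entries
  | e0 :: rest =>
    let st := rest.foldl pvAStep ([], e0)
    st.1 ++ [st.2]

-- ===== PORT B =====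
-- Source B's inner while-loop: the maximal run of consecutive entries sharing the head's key,
-- then the scan resumes after the run (index pair (i, j) becomes takeWhile/dropWhile).
def pvRuns : List (List (String × String)) → List (List (List (String × String)))
  | [] => []
  | e :: rest =>
    (e :: rest.takeWhile (fun x => pvKey x == pvKey e)) ::
      pvRuns (rest.dropWhile (fun x => pvKey x == pvKey e))
termination_by l => l.length
decreasing_by
  have := List.length_dropWhile_le (fun x => pvKey x == pvKey e) rest
  simp only [List.length_cons]
  omega

-- Source B's loop body: copy the run's head; join the texts only when the run has > 1 entry


def pvMergeRunB (g : List (List (String × String))) : List (String × String) :=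
  match g with
  | [] => []
  | h :: t => if t.isEmpty then h else pvSetText h (PySem.Str.join " " ((h :: t).map pvText))

def consolidate_speaker_entries_alt (entries : List (List (String × String))) : List (List (String × String)) :=
  match entries with
  | [] => entries
  | _ :: _ => (pvRuns entries).map pvMergeRunB

-- ===== PRECONDITION & SPEC =====
def Spec_consolidate_speaker_entries (entries : List (List (String × String))) (out : List (List (String × String))) : Prop := out = consolidate_speaker_entries_alt entries
instance (entries : List (List (String × String))) (out : List (List (String × String))) : Decidable (Spec_consolidate_speaker_entries entries out) := by unfold Spec_consolidate_speaker_entries; infer_instance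

-- ===== CLAIM (what is proved, stated in full; the proofs are below) =====
def Claim_equal_consolidate_speaker_entries : Prop := ∀ (entries : List (List (String × String))), Dom_consolidate_speaker_entries entries → Spec_consolidate_speaker_entries entries (consolidate_speaker_entries entries)

-- ===== LEMMAS AND PROOFS =====

theorem pvKey_setText (e : List (String × String)) (t : String) : pvKey (pvSetText e t) = pvKey e := by
  unfold pvKey pvGetD pvSetText
  rw [show PySem.Dict.mk (((PySem.Dict.mk e).insert "text" t).items) = (PySem.Dict.mk e).insert "text" t from rfl,
      PySem.Dict.getD_insert_of_ne _ _ _ (by decide)]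

theorem pvText_setText (e : List (String × String)) (t : String) : pvText (pvSetText e t) = t := by
  unfold pvText pvGetD pvSetText
  rw [show PySem.Dict.mk (((PySem.Dict.mk e).insert "text" t).items) = (PySem.Dict.mk e).insert "text" t from rfl,
      PySem.Dict.getD_insert_self]

theorem pvSetText_setText (e : List (String × String)) (t₁ t₂ : String) :
    pvSetText (pvSetText e t₁) t₂ = pvSetText e t₂ := by
  unfold pvSetText
  rw [show PySem.Dict.mk (((PySem.Dict.mk e).insert "text" t₁).items) = (PySem.Dict.mk e).insert "text" t₁ from rfl,
      PySem.Dict.insert_insert_self]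

theorem pvJoin_singleton (a : String) : PySem.Str.join " " [a] = a := by
  simp [PySem.Str.join, PySem.Chars.join_singleton]

theorem pvJoin_cons₂ (a b : String) (l : List String) :
    PySem.Str.join " " (a :: b :: l) = PySem.Str.join " " ((a ++ " " ++ b) :: l) := by
  show String.ofList _ = String.ofList _
  congr 1
  cases l with
  | nil => simp [PySem.Chars.join_cons_cons, PySem.Chars.join_singleton]
  | cons c cs => simp [PySem.Chars.join_cons_cons, List.append_assoc]

-- recursive characterisation of A's fold
def pvARec (cur : List (String × String)) : List (List (String × String)) → List (List (String × String))
  | [] => [cur]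
  | e :: rest =>
    if pvKey e = pvKey cur then pvARec (pvSetText cur (pvText cur ++ " " ++ pvText e)) rest
    else cur :: pvARec e rest

theorem pvFoldl_aStep (rest : List (List (String × String)))
    (acc : List (List (String × String))) (cur : List (String × String)) :
    (rest.foldl pvAStep (acc, cur)).1 ++ [(rest.foldl pvAStep (acc, cur)).2] = acc ++ pvARec cur rest := by
  induction rest generalizing acc cur with
  | nil => simp [pvARec]
  | cons e rest ih =>
    simp only [List.foldl_cons, pvAStep, pvARec]
    by_cases h : pvKey e = pvKey cur
    · simp [h, ih]
    · simp [h, ih]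

-- what B produces for the run starting at `cur` with continuation `run`
def pvMergeHead (cur : List (String × String)) (run : List (List (String × String))) : List (String × String) :=
  if run.isEmpty then cur else pvSetText cur (PySem.Str.join " " ((cur :: run).map pvText))

theorem pvMergeRunB_cons (h : List (String × String)) (t : List (List (String × String))) :
    pvMergeRunB (h :: t) = pvMergeHead h t := rfl

theorem pvMergeHead_step (cur e : List (String × String)) (run : List (List (String × String))) :
    pvMergeHead (pvSetText cur (pvText cur ++ " " ++ pvText e)) run
      = pvSetText cur (PySem.Str.join " " ((cur :: e :: run).map pvText)) := by
  cases run with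
  | nil =>
    simp only [pvMergeHead, List.isEmpty_nil, List.map_cons, List.map_nil, reduceIte]
    rw [pvJoin_cons₂, pvJoin_singleton]
  | cons r rs =>
    simp only [pvMergeHead, List.isEmpty_cons, List.map_cons, if_neg Bool.false_ne_true]
    rw [pvText_setText, pvSetText_setText, ← pvJoin_cons₂]

theorem pvARec_eq (n : Nat) :
    ∀ (l : List (List (String × String))), l.length ≤ n → ∀ (cur : List (String × String)),
      pvARec cur l
        = pvMergeHead cur (l.takeWhile (fun x => pvKey x == pvKey cur))
            :: (pvRuns (l.dropWhile (fun x => pvKey x == pvKey cur))).map pvMergeRunB := by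
  induction n with
  | zero =>
    intro l hl cur
    have : l = [] := List.length_eq_zero_iff.mp (Nat.le_zero.mp hl)
    subst this
    simp [pvARec, pvMergeHead, pvRuns]
  | succ n ih =>
    intro l hl cur
    cases l with
    | nil => simp [pvARec, pvMergeHead, pvRuns]
    | cons e rest =>
      by_cases h : pvKey e = pvKey cur
      · have hb : (pvKey e == pvKey cur) = true := by simp [h]
        simp only [pvARec, if_pos h]
        rw [ih rest (by simpa using Nat.le_of_succ_le_succ hl) (pvSetText cur (pvText cur ++ " " ++ pvText e))]
        simp only [pvKey_setText]
        rw [pvMergeHead_step]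
        simp [hb, pvMergeHead]
      · have hb : (pvKey e == pvKey cur) = false := by simp [h]
        simp only [pvARec, if_neg h, List.takeWhile_cons, List.dropWhile_cons, hb,
          Bool.false_eq_true, if_false]
        rw [show pvRuns (e :: rest)
              = (e :: rest.takeWhile (fun x => pvKey x == pvKey e)) ::
                  pvRuns (rest.dropWhile (fun x => pvKey x == pvKey e)) from by rw [pvRuns]]
        simp only [List.map_cons, pvMergeRunB_cons]
        rw [ih rest (by simpa using Nat.le_of_succ_le_succ hl) e]
        simp [pvMergeHead]

-- ===== VERDICT (by name: the statement is the Claim_ definition above) =====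
theorem consolidate_speaker_entries_spec : Claim_equal_consolidate_speaker_entries := by
  intro entries _
  unfold Spec_consolidate_speaker_entries
  cases entries with
  | nil => rfl
  | cons e0 rest =>
    show (rest.foldl pvAStep ([], e0)).1 ++ [(rest.foldl pvAStep ([], e0)).2]
        = (pvRuns (e0 :: rest)).map pvMergeRunB
    rw [pvFoldl_aStep rest [] e0, List.nil_append,
        pvARec_eq rest.length rest le_rfl e0,
        show pvRuns (e0 :: rest)
          = (e0 :: rest.takeWhile (fun x => pvKey x == pvKey e0)) ::
              pvRuns (rest.dropWhile (fun x => pvKey x == pvKey e0)) from by rw [pvRuns]]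
    simp only [List.map_cons, pvMergeRunB_cons]
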